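-- pv_equiv track=rewrite | github.com/MMD34/FC26-OTHER-SCRIPTS | app/import_/schema.py | _dtypes
-- ===== SOURCE A (Python) =====
-- def _dtypes(columns: tuple[str, ...], ints: set[str], strs: set[str], bools: set[str]) -> dict[str, str]:
--     out: dict[str, str] = {}
--     for c in columns:
--         if c in ints:
--             out[c] = "Int64"
--         elif c in bools:
--             out[c] = "boolean"
--         elif c in strs:
--             out[c] = "string"
--         else:
--             out[c] = "string"
--     return out
-- ===== SOURCE B (Python) =====
-- def _dtypes(columns, ints, strs, bools):
--     out = {c: "string" for c in columns}
--     for c in bools: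
--         if c in out:
--             out[c] = "boolean"
--     for c in ints:
--         if c in out:
--             out[c] = "Int64"
--     return out
-- ===== Notes on version B (the rewrite author's own statement) =====
-- stated objective: simpler
-- what changed: B defaults every column to "string" in one comprehension and then overwrites in two override passes over the bools and ints sets (ints last so it wins), instead of dispatching each column through a four-way if/elif cascade; the redundant strs branch disappears.
import Mathlib
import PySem

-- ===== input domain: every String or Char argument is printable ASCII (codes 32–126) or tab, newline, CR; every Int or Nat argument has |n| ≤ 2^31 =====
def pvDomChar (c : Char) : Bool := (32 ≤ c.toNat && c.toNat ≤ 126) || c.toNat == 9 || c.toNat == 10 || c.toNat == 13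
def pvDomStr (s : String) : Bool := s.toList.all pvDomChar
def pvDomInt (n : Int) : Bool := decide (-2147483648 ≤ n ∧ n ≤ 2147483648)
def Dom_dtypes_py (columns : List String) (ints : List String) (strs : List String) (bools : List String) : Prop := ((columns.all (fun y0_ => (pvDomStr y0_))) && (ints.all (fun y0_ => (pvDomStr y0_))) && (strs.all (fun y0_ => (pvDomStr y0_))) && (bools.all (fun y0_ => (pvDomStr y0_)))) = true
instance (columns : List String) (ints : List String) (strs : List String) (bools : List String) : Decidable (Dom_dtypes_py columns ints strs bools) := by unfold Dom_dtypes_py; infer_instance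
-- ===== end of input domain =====

-- B replaces A's per-column if/elif cascade by a "string" default comprehension plus two
-- constant-value override passes over bools then ints; simpler decomposition, same cost.

-- ===== PORT A =====
def dtypes_py (columns : List String) (ints : List String) (strs : List String) (bools : List String) : List (String × String) :=
  (columns.foldl (fun out c =>
      if ints.contains c then out.insert c "Int64"
      else if bools.contains c then out.insert c "boolean"
      else if strs.contains c then out.insert c "string"
      else out.insert c "string")
    PySem.Dict.empty).items

-- ===== PORT B =====
def dtypes_py_alt (columns : List String) (ints : List String) (strs : List String) (bools : List String) : List (String × String) :=
  let out0 := columns.foldl (fun out c => out.insert c "string") PySem.Dict.empty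
  let out1 := bools.foldl (fun out c => if out.contains c then out.insert c "boolean" else out) out0
  let out2 := ints.foldl (fun out c => if out.contains c then out.insert c "Int64" else out) out1
  out2.items

-- ===== PRECONDITION & SPEC =====
def Spec_dtypes_py (columns : List String) (ints : List String) (strs : List String) (bools : List String) (out : List (String × String)) : Prop := out = dtypes_py_alt columns ints strs bools
instance (columns : List String) (ints : List String) (strs : List String) (bools : List String) (out : List (String × String)) : Decidable (Spec_dtypes_py columns ints strs bools out) := by unfold Spec_dtypes_py; infer_instance

-- ===== CLAIM (what is proved, stated in full; the proofs are below) =====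
def Claim_equal_dtypes_py : Prop := ∀ (columns : List String) (ints : List String) (strs : List String) (bools : List String), Dom_dtypes_py columns ints strs bools → Spec_dtypes_py columns ints strs bools (dtypes_py columns ints strs bools)

-- ===== LEMMAS AND PROOFS =====

-- insert loop with a value depending only on the key: last write wins, value f k
theorem insGetD (f : String → String) (l : List String) (d : PySem.Dict String String)
    (k : String) (dflt : String) :
    (l.foldl (fun d c => d.insert c (f c)) d).getD k dflt
      = if k ∈ l then f k else d.getD k dflt := by
  induction l generalizing d with
  | nil => simp
  | cons a l ih =>
      simp only [List.foldl_cons, ih, List.mem_cons, PySem.Dict.getD_insert]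
      by_cases hl : k ∈ l <;> by_cases hk : k = a <;> simp [hl, hk]

-- override loop (insert only when the key is present) does not change membership
theorem ovContains (v : String) (L : List String) (d : PySem.Dict String String) (k : String) :
    (L.foldl (fun d c => if d.contains c then d.insert c v else d) d).contains k = d.contains k := by
  induction L generalizing d with
  | nil => rfl
  | cons a L ih =>
      simp only [List.foldl_cons]
      by_cases ha : d.contains a = true
      · rw [if_pos ha, ih]
        by_cases hk : k = a
        · subst hk; simp [ha]
        · simp [PySem.Dict.contains_insert, hk]
      · rw [if_neg ha, ih]


-- nor the key list (insertion order)
theorem ovKeys (v : String) (L : List String) (d : PySem.Dict String String) :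
    (L.foldl (fun d c => if d.contains c then d.insert c v else d) d).keys = d.keys := by
  induction L generalizing d with
  | nil => rfl
  | cons a L ih =>
      simp only [List.foldl_cons]
      by_cases ha : d.contains a = true
      · rw [if_pos ha, ih, PySem.Dict.keys_insert_of_contains _ _ ha]
      · rw [if_neg ha, ih]

-- its effect on lookups
theorem ovGetD (v : String) (L : List String) (d : PySem.Dict String String)
    (k : String) (dflt : String) :
    (L.foldl (fun d c => if d.contains c then d.insert c v else d) d).getD k dflt
      = if d.contains k = true ∧ k ∈ L then v else d.getD k dflt := by
  induction L generalizing d with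
  | nil => simp
  | cons a L ih =>
      simp only [List.foldl_cons]
      by_cases ha : d.contains a = true
      · rw [if_pos ha, ih]
        by_cases hk : k = a
        · subst hk
          simp [ha]
        · rw [PySem.Dict.contains_insert, PySem.Dict.getD_insert_of_ne d v dflt hk]
          have h2 : (k == a || d.contains k) = d.contains k := by simp [hk]
          rw [h2]
          by_cases hc : d.contains k = true <;> by_cases hL : k ∈ L <;>
            simp [hc, hL, hk]
      · rw [if_neg ha, ih]
        by_cases hk : k = a
        · subst hk; simp [ha]
        · simp [hk]

theorem dtypes_eq (columns ints strs bools : List String) :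
    dtypes_py columns ints strs bools = dtypes_py_alt columns ints strs bools := by
  unfold dtypes_py dtypes_py_alt
  -- A's step function is an insert of a per-key value
  have hA : (fun (out : PySem.Dict String String) c =>
      if ints.contains c then out.insert c "Int64"
      else if bools.contains c then out.insert c "boolean"
      else if strs.contains c then out.insert c "string"
      else out.insert c "string")
    = fun out c => out.insert c
        (if ints.contains c then "Int64"
         else if bools.contains c then "boolean"
         else if strs.contains c then "string" else "string") := by
    funext out c; split_ifs <;> rfl
  rw [hA]
  set fA : String → String := fun c =>
    if ints.contains c then "Int64"
    else if bools.contains c then "boolean"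
    else if strs.contains c then "string" else "string" with hfA
  set dA := columns.foldl (fun out c => out.insert c (fA c)) PySem.Dict.empty with hdA
  set d0 := columns.foldl (fun out c => out.insert c "string") PySem.Dict.empty with hd0
  set d1 := bools.foldl (fun out c => if out.contains c then out.insert c "boolean" else out) d0 with hd1
  set d2 := ints.foldl (fun out c => if out.contains c then out.insert c "Int64" else out) d1 with hd2
  have hkA : dA.keys = PySem.Set.update [] columns := by
    rw [hdA, PySem.Dict.keys_foldl_insert (f := fun _ c => fA c), PySem.Dict.keys_empty]
  have hk0 : d0.keys = PySem.Set.update [] columns := by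
    rw [hd0, PySem.Dict.keys_foldl_insert (f := fun _ _ => "string"), PySem.Dict.keys_empty]
  have hk2 : d2.keys = PySem.Set.update [] columns := by
    rw [hd2, ovKeys, hd1, ovKeys, hk0]
  have hndA : dA.keys.Nodup := PySem.Dict.nodup_keys_foldl_insert _ _ _ PySem.Dict.nodup_keys_empty
  have hnd2 : d2.keys.Nodup := by rw [hk2, ← hkA]; exact hndA
  have hc0 : ∀ k ∈ columns, d0.contains k = true := by
    intro k hk
    rw [PySem.Dict.contains_iff_mem_keys, hk0]
    exact (PySem.Set.mem_update _ _ _).2 (Or.inr hk)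
  rw [PySem.Dict.items_eq_map_keys dA hndA "", PySem.Dict.items_eq_map_keys d2 hnd2 "",
    hkA, hk2]
  apply List.map_congr_left
  intro k hkmem
  have hkcol : k ∈ columns := by
    rcases (PySem.Set.mem_update _ _ _).1 hkmem with h | h
    · simp at h
    · exact h
  have hvA : dA.getD k "" = fA k := by rw [hdA, insGetD, if_pos hkcol]
  have hv0 : d0.getD k "" = "string" := by
    rw [hd0, insGetD (fun _ => "string"), if_pos hkcol]
  have hv1 : d1.getD k "" = if k ∈ bools then "boolean" else "string" := by
    rw [hd1, ovGetD, hv0, hc0 k hkcol]; simp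
  have hv2 : d2.getD k "" = fA k := by
    rw [hd2, ovGetD, hv1, hd1, ovContains, hc0 k hkcol, hfA]
    simp only [true_and]
    by_cases hi : k ∈ ints <;> by_cases hb : k ∈ bools <;>
      simp [hi, hb]
  rw [hvA, hv2]

-- ===== VERDICT (by name: the statement is the Claim_ definition above) =====
theorem dtypes_py_spec : Claim_equal_dtypes_py := by
  intro columns ints strs bools _
  unfold Spec_dtypes_py
  exact dtypes_eq columns ints strs bools
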